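-- pv_equiv track=rewrite | github.com/kainatkiranrashid2/pak-ikmc-testing-python | utils copy.py | group_circles_by_row
-- ===== SOURCE A (Python) =====
-- def group_circles_by_row(circle_centers):
--     """
--     Group circles into rows based on y-coordinate proximity.
--
--     Parameters:
--         circle_centers (list): List of circle centers (x, y, radius).
--
--     Returns:
--         list: List of grouped circles.
--     """
--     circle_centers.sort(key=lambda c: c[1])  # Sort by y-coordinate
--     grouped_circles = []
--     current_group = [circle_centers[0]]
--
--     for i in range(1, len(circle_centers)):
--         if abs(circle_centers[i][1] - current_group[-1][1]) <= 4:
--             current_group.append(circle_centers[i])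
--         else:
--             grouped_circles.append(current_group)
--             current_group = [circle_centers[i]]
--
--     if current_group:
--         grouped_circles.append(current_group)
--     return grouped_circles
-- ===== SOURCE B (Python) =====
-- def group_circles_by_row(circle_centers):
--     """
--     Group circles into rows based on y-coordinate proximity.
--
--     Cut-point formulation: sort, collect the boundary indices where the
--     y-gap between consecutive circles exceeds 4, then slice between them.
--     Returns [] for an empty input (where the original raises IndexError).
--     """
--     circle_centers.sort(key=lambda c: c[1])
--     if not circle_centers:
--         return []
--     cuts = [0] + [i for i in range(1, len(circle_centers))
--                   if abs(circle_centers[i][1] - circle_centers[i - 1][1]) > 4] \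
--                + [len(circle_centers)]
--     return [circle_centers[a:b] for a, b in zip(cuts, cuts[1:])]
-- ===== Notes on version B (the rewrite author's own statement) =====
-- stated objective: alternative
-- what changed: Replaces the interleaved group-building loop (mutable current_group flushed on gaps) by a cut-point pass collecting boundary indices followed by a slicing comprehension between consecutive boundaries; bulk list slicing replaces per-element appends.
import Mathlib
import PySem

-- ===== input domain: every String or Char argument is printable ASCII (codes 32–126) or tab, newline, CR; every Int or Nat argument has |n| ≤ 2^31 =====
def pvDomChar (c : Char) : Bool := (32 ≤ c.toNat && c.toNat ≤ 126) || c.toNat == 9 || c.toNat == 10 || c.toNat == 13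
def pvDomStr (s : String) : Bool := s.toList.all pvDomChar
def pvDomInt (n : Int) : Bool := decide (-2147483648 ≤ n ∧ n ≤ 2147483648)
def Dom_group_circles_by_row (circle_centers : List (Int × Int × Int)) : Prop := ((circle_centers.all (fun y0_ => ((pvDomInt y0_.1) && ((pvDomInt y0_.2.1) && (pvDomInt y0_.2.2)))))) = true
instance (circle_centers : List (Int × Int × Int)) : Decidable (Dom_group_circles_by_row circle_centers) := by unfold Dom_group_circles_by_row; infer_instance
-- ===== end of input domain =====

-- B replaces A's interleaved group-building loop by a cut-point pass plus slicing (alternative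
-- decomposition, same cost). Both Pythons sort circle_centers in place; the claim is about the
-- RETURN value only (the in-place sort is identical in A and B).

-- ===== PORT A =====
-- On [] Python raises IndexError at circle_centers[0] (excluded by Pre_); the port returns [] there.
def group_circles_by_row (circle_centers : List (Int × Int × Int)) : List (List (Int × Int × Int)) :=
  let s := PySem.List.sorted circle_centers (key := fun c => c.2.1)
  match PySem.List.pyGet? s 0 with
  | none => []
  | some c0 =>
    let st := (PySem.List.pyRange 1 (s.length : Int) 1).foldl
      (fun (st : List (List (Int × Int × Int)) × List (Int × Int × Int)) i =>
        if |(PySem.List.pyGetD s i (0, 0, 0)).2.1 - (PySem.List.pyGetD st.2 (-1) (0, 0, 0)).2.1| ≤ 4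
        then (st.1, st.2 ++ [PySem.List.pyGetD s i (0, 0, 0)])
        else (st.1 ++ [st.2], [PySem.List.pyGetD s i (0, 0, 0)]))
      ([], [c0])
    if st.2 ≠ [] then st.1 ++ [st.2] else st.1

-- ===== PORT B =====
def group_circles_by_row_alt (circle_centers : List (Int × Int × Int)) : List (List (Int × Int × Int)) :=
  let s := PySem.List.sorted circle_centers (key := fun c => c.2.1)
  if s = [] then []
  else
    let cuts : List Int :=
      [0] ++ (PySem.List.pyRange 1 (s.length : Int) 1).filter
        (fun i => decide (4 < |(PySem.List.pyGetD s i (0, 0, 0)).2.1 - (PySem.List.pyGetD s (i - 1) (0, 0, 0)).2.1|))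
      ++ [(s.length : Int)]
    (cuts.zip (PySem.List.slice cuts (some 1) none)).map
      (fun ab => PySem.List.slice s (some ab.1) (some ab.2))

-- ===== PRECONDITION & SPEC =====
-- Pre_ excludes exactly the empty list, on which A raises IndexError.
def Pre_group_circles_by_row (circle_centers : List (Int × Int × Int)) : Prop :=
  circle_centers ≠ []
instance (circle_centers : List (Int × Int × Int)) : Decidable (Pre_group_circles_by_row circle_centers) := by
  unfold Pre_group_circles_by_row; infer_instance

def pvWitness_group_circles_by_row : (List (Int × Int × Int)) := [(1, 2, 3), (0, 9, 1), (5, 3, 2)]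

def Spec_group_circles_by_row (circle_centers : List (Int × Int × Int)) (out : List (List (Int × Int × Int))) : Prop := out = group_circles_by_row_alt circle_centers
instance (circle_centers : List (Int × Int × Int)) (out : List (List (Int × Int × Int))) : Decidable (Spec_group_circles_by_row circle_centers out) := by unfold Spec_group_circles_by_row; infer_instance

-- ===== CLAIM (what is proved, stated in full; the proofs are below) =====
def Claim_equal_group_circles_by_row : Prop := ∀ (circle_centers : List (Int × Int × Int)), Dom_group_circles_by_row circle_centers → Pre_group_circles_by_row circle_centers → Spec_group_circles_by_row circle_centers (group_circles_by_row circle_centers)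

-- ===== LEMMAS AND PROOFS =====

-- Reference recursion: first group and remaining groups of a::l, splitting where the y-gap exceeds 4.
def pvSg (a : Int × Int × Int) : List (Int × Int × Int) → List (Int × Int × Int) × List (List (Int × Int × Int))
  | [] => ([a], [])
  | b :: l =>
    let r := pvSg b l
    if |b.2.1 - a.2.1| ≤ 4 then (a :: r.1, r.2) else ([a], r.1 :: r.2)

-- Slices of s between consecutive cut points, starting at prev.
def pvSlices (s : List (Int × Int × Int)) (prev : Int) : List Int → List (List (Int × Int × Int))
  | [] => []
  | c :: cs => PySem.List.slice s (some prev) (some c) :: pvSlices s c cs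

theorem pvSlices_nil (s : List (Int × Int × Int)) (prev : Int) : pvSlices s prev [] = [] := rfl

theorem pvSlices_cons (s : List (Int × Int × Int)) (prev c : Int) (cs : List Int) :
    pvSlices s prev (c :: cs) = PySem.List.slice s (some prev) (some c) :: pvSlices s c cs := rfl

theorem pvZipMap (g : Int × Int → List (Int × Int × Int)) (s : List (Int × Int × Int))
    (hg : ∀ p : Int × Int, g p = PySem.List.slice s (some p.1) (some p.2))
    (x : Int) (xs : List Int) :
    ((x :: xs).zip xs).map g = pvSlices s x xs := by
  induction xs generalizing x with
  | nil => simp [pvSlices_nil]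
  | cons c cs ih => simp [pvSlices_cons, hg, ih c]

theorem pvSliceCons (s : List (Int × Int × Int)) (j : Nat) (c : Int)
    (hjc : (j : Int) < c) (hj : j < s.length) :
    PySem.List.slice s (some (j : Int)) (some c) =
      s[j] :: PySem.List.slice s (some ((j : Int) + 1)) (some c) := by
  rw [PySem.List.slice_toNat s (by omega) (by omega),
      PySem.List.slice_toNat s (by omega) (by omega)]
  have h1 : ((j : Int)).toNat = j := by omega
  have h2 : ((j : Int) + 1).toNat = j + 1 := by omega
  rw [h1, h2, List.drop_eq_getElem_cons hj]
  have h3 : c.toNat - j = (c.toNat - (j + 1)) + 1 := by omega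
  rw [h3, List.take_succ_cons]

-- A's loop (after foldl_pyRange_pyGetD) computes pvSg.
theorem pvL1 (l : List (Int × Int × Int)) (grouped : List (List (Int × Int × Int)))
    (pre : List (Int × Int × Int)) (a : Int × Int × Int) :
    (if (l.foldl
      (fun (st : List (List (Int × Int × Int)) × List (Int × Int × Int)) c =>
        if |c.2.1 - (PySem.List.pyGetD st.2 (-1) (0, 0, 0)).2.1| ≤ 4
        then (st.1, st.2 ++ [c])
        else (st.1 ++ [st.2], [c])) (grouped, pre ++ [a])).2 ≠ []
     then (l.foldl
      (fun (st : List (List (Int × Int × Int)) × List (Int × Int × Int)) c =>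
        if |c.2.1 - (PySem.List.pyGetD st.2 (-1) (0, 0, 0)).2.1| ≤ 4
        then (st.1, st.2 ++ [c])
        else (st.1 ++ [st.2], [c])) (grouped, pre ++ [a])).1 ++ [(l.foldl
      (fun (st : List (List (Int × Int × Int)) × List (Int × Int × Int)) c =>
        if |c.2.1 - (PySem.List.pyGetD st.2 (-1) (0, 0, 0)).2.1| ≤ 4
        then (st.1, st.2 ++ [c])
        else (st.1 ++ [st.2], [c])) (grouped, pre ++ [a])).2]
     else (l.foldl
      (fun (st : List (List (Int × Int × Int)) × List (Int × Int × Int)) c =>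
        if |c.2.1 - (PySem.List.pyGetD st.2 (-1) (0, 0, 0)).2.1| ≤ 4
        then (st.1, st.2 ++ [c])
        else (st.1 ++ [st.2], [c])) (grouped, pre ++ [a])).1) =
    grouped ++ (pre ++ (pvSg a l).1) :: (pvSg a l).2 := by
  induction l generalizing grouped pre a with
  | nil => simp [pvSg]
  | cons b l ih =>
    simp only [List.foldl_cons, PySem.List.pyGetD_neg_one_append_singleton, pvSg]
    by_cases h : |b.2.1 - a.2.1| ≤ 4
    · have h2 := ih grouped (pre ++ [a]) b
      simp only [List.append_assoc, List.singleton_append] at h2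
      simpa [h] using h2
    · simpa [h] using ih (grouped ++ [pre ++ [a]]) [] b

-- B's cut points and slices compute pvSg.
theorem pvL2 (s : List (Int × Int × Int)) (l : List (Int × Int × Int))
    (a : Int × Int × Int) (j : Nat) (hs : s.drop j = a :: l) :
    pvSlices s (j : Int)
      (((PySem.List.pyRange ((j : Int) + 1) (s.length : Int) 1).filter
        (fun i => decide (4 < |(PySem.List.pyGetD s i (0, 0, 0)).2.1 - (PySem.List.pyGetD s (i - 1) (0, 0, 0)).2.1|)))
       ++ [(s.length : Int)]) =
    (pvSg a l).1 :: (pvSg a l).2 := by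
  induction l generalizing a j with
  | nil =>
    have hlen : s.length = j + 1 := by
      have h := congrArg List.length hs
      simp [List.length_drop] at h
      omega
    rw [PySem.List.pyRange_one_eq_nil (by omega)]
    simp only [List.filter_nil, List.nil_append, pvSlices_cons, pvSlices_nil, pvSg]
    rw [PySem.List.slice_toNat s (by omega) (by omega)]
    have h1 : ((j : Int)).toNat = j := by omega
    have h2 : ((s.length : Int)).toNat = s.length := by omega
    rw [h1, h2, hs, hlen]
    simp
  | cons b l ih =>
    have hlen : j + 2 ≤ s.length := by
      have h := congrArg List.length hs
      simp [List.length_drop] at h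
      omega
    have ha : s[j]? = some a := by
      have h : (s.drop j)[0]? = s[j + 0]? := List.getElem?_drop
      rw [hs] at h; simpa using h.symm
    have hb : s[j + 1]? = some b := by
      have h : (s.drop j)[1]? = s[j + 1]? := List.getElem?_drop
      rw [hs] at h; simpa using h.symm
    have ea : PySem.List.pyGetD s ((j : Int) + 1 - 1) (0, 0, 0) = a := by
      have he : ((j : Int) + 1 - 1) = ((j : Nat) : Int) := by ring
      rw [he, PySem.List.pyGetD_natCast]
      simp [List.getD_eq_getElem?_getD, ha]
    have eb : PySem.List.pyGetD s ((j : Int) + 1) (0, 0, 0) = b := by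
      have he : ((j : Int) + 1) = (((j + 1 : Nat)) : Int) := by push_cast; ring
      rw [he, PySem.List.pyGetD_natCast]
      simp [List.getD_eq_getElem?_getD, hb]
    have hdrop : s.drop (j + 1) = b :: l := by
      have h : (s.drop j).tail = s.drop (j + 1) := List.tail_drop
      rw [hs] at h; simpa using h.symm
    have ihm := ih b (j + 1) hdrop
    have hcast : (((j + 1 : Nat)) : Int) = (j : Int) + 1 := by push_cast; ring
    rw [hcast] at ihm
    rw [PySem.List.pyRange_one_cons (by omega)]
    simp only [List.filter_cons, ea, eb]
    by_cases hgap : 4 < |b.2.1 - a.2.1|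
    · rw [if_pos (decide_eq_true hgap)]
      rw [List.cons_append, pvSlices_cons, ihm]
      have hsg : pvSg a (b :: l) = ([a], (pvSg b l).1 :: (pvSg b l).2) := by
        simp [pvSg, show ¬ (|b.2.1 - a.2.1| ≤ 4) by omega]
      rw [hsg]
      have hsl : PySem.List.slice s (some ((j : Int))) (some ((j : Int) + 1)) = [a] := by
        rw [PySem.List.slice_toNat s (by omega) (by omega)]
        have h1 : ((j : Int)).toNat = j := by omega
        have h2 : ((j : Int) + 1).toNat = j + 1 := by omega
        rw [h1, h2, hs]
        simp
      rw [hsl]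
    · rw [if_neg (by simpa using hgap)]
      set rest := (PySem.List.pyRange ((j : Int) + 1 + 1) (s.length : Int)).filter
        (fun i => decide (4 < |(PySem.List.pyGetD s i (0, 0, 0)).2.1 - (PySem.List.pyGetD s (i - 1) (0, 0, 0)).2.1|)) with hrest
      rcases hc : rest ++ [(s.length : Int)] with _ | ⟨c1, cs⟩
      · exact absurd hc (by simp)
      have hc1 : (j : Int) < c1 := by
        rcases hr : rest with _ | ⟨r0, rs⟩
        · rw [hr] at hc; simp at hc; omega
        · rw [hr] at hc
          simp only [List.cons_append, List.cons.injEq] at hc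
          have hm : r0 ∈ rest := by rw [hr]; exact List.mem_cons_self
          have hmem := List.filter_subset' _ hm
          rw [PySem.List.mem_pyRange_one] at hmem
          omega
      rw [hc] at ihm
      rw [pvSlices_cons] at ihm ⊢
      have hj : j < s.length := by omega
      rw [pvSliceCons s j c1 hc1 hj]
      have hsja : s[j] = a := by
        have h := ha
        rw [List.getElem?_eq_getElem hj] at h
        exact Option.some.inj h
      have hsg : pvSg a (b :: l) = (a :: (pvSg b l).1, (pvSg b l).2) := by
        simp [pvSg, show |b.2.1 - a.2.1| ≤ 4 by omega]
      rw [hsg]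
      simp only [List.cons.injEq] at ihm
      rw [hsja, ihm.1, ihm.2]

-- ===== VERDICT (by name: the statement is the Claim_ definition above) =====
theorem group_circles_by_row_spec : Claim_equal_group_circles_by_row := by
  intro cc _ hne
  unfold Spec_group_circles_by_row group_circles_by_row group_circles_by_row_alt
  have hsne : PySem.List.sorted cc (fun c => c.2.1) ≠ [] := by
    intro h
    have hp := PySem.List.sorted_perm (xs := cc) (key := fun c => c.2.1) (rev := false)
    rw [h] at hp
    exact hne hp.nil_eq.symm
  obtain ⟨c0, rest, hs⟩ := List.exists_cons_of_ne_nil hsne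
  rw [hs]
  have hget : PySem.List.pyGet? (c0 :: rest) 0 = some c0 := by
    simp [PySem.List.pyGet?, PySem.List.pyIdx?]
  simp only [hget]
  rw [if_neg (List.cons_ne_nil c0 rest)]
  rw [PySem.List.foldl_pyRange_pyGetD' (c0 :: rest) (0, 0, 0)
      (fun (st : List (List (Int × Int × Int)) × List (Int × Int × Int)) c =>
        if |c.2.1 - (PySem.List.pyGetD st.2 (-1) (0, 0, 0)).2.1| ≤ 4
        then (st.1, st.2 ++ [c])
        else (st.1 ++ [st.2], [c])) ([], [c0]) (by omega)]
  simp only [Int.toNat_one, List.drop_one, List.tail_cons]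
  have hA := pvL1 rest [] [] c0
  simp only [List.nil_append] at hA
  rw [hA]
  simp only [List.cons_append, List.nil_append, PySem.List.slice_from_one, List.tail_cons]
  rw [pvZipMap _ (c0 :: rest) (fun p => rfl)]
  have hB := pvL2 (c0 :: rest) rest c0 0 (by simp)
  simp only [Nat.cast_zero, zero_add] at hB
  rw [hB]
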